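-- pv_equiv track=rewrite | github.com/jellyhani/booktokipy | booktoki.py | format_text_for_readability
-- ===== SOURCE A (Python) =====
-- def format_text_for_readability(text, max_line_length=80):
--     lines = text.splitlines()
--     formatted_lines = []
--
--     blank_count = 0
--     for line in lines:
--         line = line.rstrip()
--         if not line.strip():
--             blank_count += 1
--             if blank_count <= 1:
--                 formatted_lines.append("")
--         else:
--             blank_count = 0
--             while len(line) > max_line_length:
--                 formatted_lines.append(line[:max_line_length])
--                 line = line[max_line_length:]
--             formatted_lines.append(line)
--
--     return "\n".join(formatted_lines)
-- ===== SOURCE B (Python) =====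
-- def format_text_for_readability(text, max_line_length=80):
--     # Pass 1: flat list of wrapped pieces ("" for a blank line)
--     wrapped = []
--     for raw in text.splitlines():
--         line = raw.rstrip()
--         if not line:
--             wrapped.append("")
--         else:
--             for i in range(0, len(line), max_line_length):
--                 wrapped.append(line[i:i + max_line_length])
--     # Pass 2: collapse runs of empty strings to a single ""
--     out = []
--     for piece in wrapped:
--         if piece == "" and out and out[-1] == "":
--             continue
--         out.append(piece)
--     return "\n".join(out)
-- ===== Notes on version B (the rewrite author's own statement) =====
-- stated objective: alternative
-- what changed: A's single stateful pass (blank_count counter interleaved with an in-place while-slicing loop) is replaced by two separate passes: pass 1 builds a flat list of wrapped pieces ("" per blank line, fixed-width slices per non-blank line via range), pass 2 collapses consecutive empty strings by checking the last emitted element.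
import Mathlib
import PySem

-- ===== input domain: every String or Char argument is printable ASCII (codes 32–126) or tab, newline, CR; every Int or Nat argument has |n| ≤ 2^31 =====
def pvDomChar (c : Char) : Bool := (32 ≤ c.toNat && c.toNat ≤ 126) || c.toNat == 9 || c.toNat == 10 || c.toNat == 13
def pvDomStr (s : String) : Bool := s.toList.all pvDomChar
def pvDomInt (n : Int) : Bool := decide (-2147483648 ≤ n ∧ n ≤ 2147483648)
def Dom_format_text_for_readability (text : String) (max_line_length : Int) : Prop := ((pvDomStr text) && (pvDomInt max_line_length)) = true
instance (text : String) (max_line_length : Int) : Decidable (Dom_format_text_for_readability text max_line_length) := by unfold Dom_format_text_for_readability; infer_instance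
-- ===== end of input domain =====

-- B restructures A's single stateful pass into two passes (flat wrap list, then blank-collapse); same return value, not faster.

-- ===== PORT A =====
-- the 'while len(line) > max_line_length' loop; fuel (= initial line length) only makes it total,
-- it is never exhausted when 1 ≤ max_line_length (Python diverges when max_line_length ≤ 0)
def pvChopA (m : Int) : Nat → List Char → List (List Char) → List (List Char)
  | 0, line, acc => acc ++ [line]
  | fuel + 1, line, acc =>
    if m < PySem.Chars.len line then
      pvChopA m fuel (PySem.Chars.slice line (some m) none)
        (acc ++ [PySem.Chars.slice line none (some m)])
    else acc ++ [line]

-- one iteration of A's 'for line in lines' loop; state = (blank_count, formatted_lines)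
def pvStepA (m : Int) (st : Int × List (List Char)) (raw : List Char) : Int × List (List Char) :=
  if PySem.Chars.strip (PySem.Chars.rstrip raw) = [] then
    (st.1 + 1, if st.1 + 1 ≤ 1 then st.2 ++ [[]] else st.2)
  else
    (0, pvChopA m (PySem.Chars.rstrip raw).length (PySem.Chars.rstrip raw) st.2)

def format_text_for_readability (text : String) (max_line_length : Int) : String :=
  String.ofList (PySem.Chars.join ['\n']
    ((PySem.Chars.splitlines text.toList).foldl (pvStepA max_line_length) (0, [])).2)

-- ===== PORT B =====
-- pass 1: one line of B's 'wrapped' list ("", or the fixed-width slices of the line)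
def pvWrap1 (m : Int) (acc : List (List Char)) (raw : List Char) : List (List Char) :=
  if PySem.Chars.rstrip raw = [] then acc ++ [[]]
  else acc ++ (PySem.List.pyRange 0 (PySem.Chars.len (PySem.Chars.rstrip raw)) m).map
      (fun i => PySem.Chars.slice (PySem.Chars.rstrip raw) (some i) (some (i + m)))

-- pass 2: skip an empty piece when the previously emitted element is also empty
def pvCollapse (out : List (List Char)) (piece : List Char) : List (List Char) :=
  if piece = [] ∧ PySem.List.pyGet? out (-1) = some [] then out else out ++ [piece]

def format_text_for_readability_alt (text : String) (max_line_length : Int) : String :=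
  String.ofList (PySem.Chars.join ['\n']
    ((((PySem.Chars.splitlines text.toList).foldl (pvWrap1 max_line_length) []).foldl pvCollapse [])))

-- ===== PRECONDITION & SPEC =====
-- Pre_ excludes exactly the inputs where max_line_length ≤ 0 and some line is non-blank after rstrip:
-- there A's while loop never terminates (A returns no value), so nothing is excluded on which A returns.
def Pre_format_text_for_readability (text : String) (max_line_length : Int) : Prop :=
  1 ≤ max_line_length ∨
    ∀ l ∈ PySem.Chars.splitlines text.toList, PySem.Chars.rstrip l = []
instance (text : String) (max_line_length : Int) : Decidable (Pre_format_text_for_readability text max_line_length) := by unfold Pre_format_text_for_readability; infer_instance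

def pvWitness_format_text_for_readability : String × Int := ("hello world\n\n\n  hi", 4)

def Spec_format_text_for_readability (text : String) (max_line_length : Int) (out : String) : Prop := out = format_text_for_readability_alt text max_line_length
instance (text : String) (max_line_length : Int) (out : String) : Decidable (Spec_format_text_for_readability text max_line_length out) := by unfold Spec_format_text_for_readability; infer_instance

-- ===== CLAIM (what is proved, stated in full; the proofs are below) =====
def Claim_equal_format_text_for_readability : Prop := ∀ (text : String) (max_line_length : Int), Dom_format_text_for_readability text max_line_length → Pre_format_text_for_readability text max_line_length → Spec_format_text_for_readability text max_line_length (format_text_for_readability text max_line_length)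

-- ===== LEMMAS AND PROOFS =====

lemma pv_forall_dropWhile_iff {α : Type} (p : α → Bool) (l : List α) :
    (∀ c ∈ l.dropWhile p, p c) ↔ (∀ c ∈ l, p c) := by
  constructor
  · intro h c hc
    rw [← List.takeWhile_append_dropWhile (p := p) (l := l)] at hc
    rcases List.mem_append.1 hc with h1 | h2
    · exact List.mem_takeWhile_imp h1
    · exact h c h2
  · intro h c hc
    exact h c ((List.dropWhile_sublist p).mem hc)

lemma pv_rstrip_eq_nil_iff (l : List Char) :
    PySem.Chars.rstrip l = [] ↔ ∀ c ∈ l, PySem.Chars.isspace c := by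
  simp [PySem.Chars.rstrip, List.dropWhile_eq_nil_iff]

lemma pv_strip_eq_nil_iff (l : List Char) :
    PySem.Chars.strip l = [] ↔ ∀ c ∈ l, PySem.Chars.isspace c := by
  rw [PySem.Chars.strip, pv_rstrip_eq_nil_iff, PySem.Chars.lstrip, pv_forall_dropWhile_iff]

lemma pv_all_space_rstrip (raw : List Char)
    (h : ∀ c ∈ PySem.Chars.rstrip raw, PySem.Chars.isspace c) :
    PySem.Chars.rstrip raw = [] := by
  by_contra hne
  have hd : List.dropWhile PySem.Chars.isspace raw.reverse ≠ [] := by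
    intro h'
    exact hne (by simp [PySem.Chars.rstrip, h'])
  have hhead := List.head_dropWhile_not PySem.Chars.isspace hd
  have hmem : (List.dropWhile PySem.Chars.isspace raw.reverse).head hd ∈ PySem.Chars.rstrip raw := by
    rw [PySem.Chars.rstrip, List.mem_reverse]
    exact List.head_mem hd
  have := h _ hmem
  rw [this] at hhead
  cases hhead

-- A's blank test on the rstripped line is the emptiness test B uses
lemma pv_blank_iff (raw : List Char) :
    PySem.Chars.strip (PySem.Chars.rstrip raw) = [] ↔ PySem.Chars.rstrip raw = [] := by
  constructor
  · intro h
    exact pv_all_space_rstrip raw ((pv_strip_eq_nil_iff _).1 h)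
  · intro h
    rw [h]
    rfl

-- B's per-line slice list
def pvPieces (m : Int) (line : List Char) : List (List Char) :=
  (PySem.List.pyRange 0 (PySem.Chars.len line) m).map
    (fun i => PySem.Chars.slice line (some i) (some (i + m)))

lemma pv_pieces_small (m : Int) (line : List Char) (hm : 1 ≤ m)
    (h0 : line ≠ []) (hL : (line.length : Int) ≤ m) : pvPieces m line = [line] := by
  obtain ⟨M, rfl⟩ : ∃ M : Nat, m = (M : Int) := ⟨m.toNat, (Int.toNat_of_nonneg (by omega)).symm⟩
  have hM : 1 ≤ M := by exact_mod_cast hm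
  have h0' : 0 < line.length := List.length_pos_iff.mpr h0
  have hL' : line.length ≤ M := by exact_mod_cast hL
  unfold pvPieces
  rw [PySem.Chars.len_eq, PySem.List.pyRange_of_pos _ _ (by exact_mod_cast hM : (0:Int) < (M:Int))]
  have hn : (if (0:Int) < (line.length : Int) then (((line.length : Int) - 0 + M - 1) / M).toNat else 0) = 1 := by
    rw [if_pos (by exact_mod_cast h0')]
    rw [show ((line.length : Int) - 0 + M - 1) = ((line.length + M - 1 : Nat) : Int) by omega]
    rw [← Int.natCast_div, Int.toNat_natCast]
    exact Nat.div_eq_of_lt_le (by omega) (by omega)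
  rw [hn]
  simp only [List.range_one, List.map_cons, List.map_nil, PySem.Chars.slice_eq_listSlice]
  rw [show ((0:Int) + (M:Int) * ((0:Nat):Int)) = ((0:Nat):Int) by push_cast; ring,
      show ((0:Nat):Int) + (M:Int) = ((M:Nat):Int) by simp]
  rw [PySem.List.slice_natCast]
  simp only [Nat.sub_zero, List.drop_zero]
  rw [List.take_of_length_le hL']

lemma pv_slice_shift (M : Nat) (line : List Char) (j : Int) (hj : 0 ≤ j) :
    PySem.List.slice line (some (j + (M:Int))) (some (j + (M:Int) + (M:Int)))
      = PySem.List.slice (line.drop M) (some j) (some (j + (M:Int))) := by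
  rw [PySem.List.slice_toNat _ (by omega) (by omega),
      PySem.List.slice_toNat _ (by omega) (by omega), List.drop_drop]
  have h1 : (j + (M:Int) + (M:Int)).toNat - (j + (M:Int)).toNat = (j + (M:Int)).toNat - j.toNat := by
    omega
  have h2 : (j + (M:Int)).toNat = M + j.toNat := by omega
  rw [h1, h2]

lemma pv_pieces_step (m : Int) (line : List Char) (hm : 1 ≤ m)
    (h : m < (line.length : Int)) :
    pvPieces m line = line.take m.toNat :: pvPieces m (line.drop m.toNat) := by
  obtain ⟨M, rfl⟩ : ∃ M : Nat, m = (M : Int) := ⟨m.toNat, (Int.toNat_of_nonneg (by omega)).symm⟩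
  have hM : 1 ≤ M := by exact_mod_cast hm
  have hML : M < line.length := by exact_mod_cast h
  simp only [Int.toNat_natCast]
  unfold pvPieces
  rw [PySem.Chars.len_eq, PySem.Chars.len_eq,
      PySem.List.pyRange_of_pos _ _ (by exact_mod_cast hM : (0:Int) < (M:Int)),
      PySem.List.pyRange_of_pos _ _ (by exact_mod_cast hM : (0:Int) < (M:Int))]
  have hnL : (if (0:Int) < (line.length : Int) then (((line.length : Int) - 0 + M - 1) / M).toNat else 0)
      = (line.length + M - 1) / M := by
    rw [if_pos (by exact_mod_cast (by omega : 0 < line.length))]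
    rw [show ((line.length : Int) - 0 + M - 1) = ((line.length + M - 1 : Nat) : Int) by omega]
    rw [← Int.natCast_div, Int.toNat_natCast]
  have hnD : (if (0:Int) < ((line.drop M).length : Int) then ((((line.drop M).length : Int) - 0 + M - 1) / M).toNat else 0)
      = (line.length - M + M - 1) / M := by
    rw [List.length_drop]
    rw [if_pos (by exact_mod_cast (by omega : 0 < line.length - M))]
    rw [show (((line.length - M : Nat) : Int) - 0 + M - 1) = ((line.length - M + M - 1 : Nat) : Int) by omega]
    rw [← Int.natCast_div, Int.toNat_natCast]
  rw [hnL, hnD,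
      show (line.length + M - 1) / M = (line.length - M + M - 1) / M + 1 by
        rw [show line.length + M - 1 = (line.length - M + M - 1) + M by omega,
            Nat.add_div_right _ (by omega)],
      List.range_succ_eq_map]
  simp only [List.map_cons, List.map_map]
  congr 1
  · norm_num
  · apply List.map_congr_left
    intro k _
    have hshift := pv_slice_shift M line ((M:Int) * (k:Int)) (by positivity)
    simp only [Function.comp_apply, PySem.Chars.slice_eq_listSlice]
    convert hshift using 3 <;> push_cast <;> ring

lemma pv_pieces_ne_nil (m : Int) (line : List Char) (hm : 1 ≤ m) (_h0 : line ≠ []) :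
    ∀ p ∈ pvPieces m line, p ≠ [] := by
  intro p hp
  unfold pvPieces at hp
  rw [PySem.Chars.len_eq] at hp
  obtain ⟨i, hi, rfl⟩ := List.mem_map.1 hp
  rw [PySem.List.mem_pyRange_iff_of_pos (by omega)] at hi
  obtain ⟨h1, h2, -⟩ := hi
  rw [PySem.Chars.slice_eq_listSlice, PySem.List.slice_toNat _ h1 (by omega)]
  simp only [ne_eq, List.take_eq_nil_iff, List.drop_eq_nil_iff, not_or, not_le]
  omega

lemma pv_pieces_nonempty (m : Int) (line : List Char) (hm : 1 ≤ m) (h0 : line ≠ []) :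
    pvPieces m line ≠ [] := by
  have h00 : (0:Int) ∈ PySem.List.pyRange 0 (line.length : Int) m := by
    rw [PySem.List.mem_pyRange_iff_of_pos (by omega)]
    refine ⟨le_rfl, ?_, by simp⟩
    exact_mod_cast List.length_pos_iff.mpr h0
  have hmem := List.mem_map_of_mem
    (f := fun i => PySem.Chars.slice line (some i) (some (i + m))) h00
  unfold pvPieces
  rw [PySem.Chars.len_eq]
  exact List.ne_nil_of_mem hmem

lemma pv_chop_eq (m : Int) (hm : 1 ≤ m) :
    ∀ (fuel : Nat) (line : List Char) (acc : List (List Char)),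
      line ≠ [] → line.length ≤ fuel →
      pvChopA m fuel line acc = acc ++ pvPieces m line := by
  intro fuel
  induction fuel with
  | zero =>
    intro line acc h0 hf
    exact absurd (List.eq_nil_of_length_eq_zero (by omega)) h0
  | succ n ih =>
    intro line acc h0 hf
    simp only [pvChopA, PySem.Chars.len_eq]
    by_cases hlt : m < (line.length : Int)
    · rw [if_pos hlt, PySem.Chars.slice_eq_listSlice, PySem.Chars.slice_eq_listSlice,
          PySem.List.slice_from _ (by omega), PySem.List.slice_to _ (by omega)]
      have hM : m.toNat < line.length := by omega
      have hne' : line.drop m.toNat ≠ [] := by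
        rw [ne_eq, List.drop_eq_nil_iff]
        omega
      have hf' : (line.drop m.toNat).length ≤ n := by
        rw [List.length_drop]
        omega
      rw [ih _ _ hne' hf', pv_pieces_step m line hm hlt]
      simp
    · rw [if_neg hlt, pv_pieces_small m line hm h0 (by omega)]

-- collapse appends every piece of a list of non-empty pieces
lemma pv_collapse_ne_nil (ps : List (List Char)) :
    ∀ acc, (∀ p ∈ ps, p ≠ []) → ps.foldl pvCollapse acc = acc ++ ps := by
  induction ps with
  | nil => intro acc _; simp
  | cons p ps ih =>
    intro acc h
    have hp : p ≠ [] := h p (by simp)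
    rw [List.foldl_cons, show pvCollapse acc p = acc ++ [p] from by simp [pvCollapse, hp],
        ih _ (fun q hq => h q (by simp [hq]))]
    simp

-- B's per-line contribution to 'wrapped'
def pvPieceOf (m : Int) (raw : List Char) : List (List Char) :=
  if PySem.Chars.rstrip raw = [] then [[]] else pvPieces m (PySem.Chars.rstrip raw)

lemma pv_wrap1_eq (m : Int) (acc : List (List Char)) (raw : List Char) :
    pvWrap1 m acc raw = acc ++ pvPieceOf m raw := by
  simp only [pvWrap1, pvPieceOf, pvPieces]
  split <;> rfl

-- main loop invariant: A's accumulated lines equal B's collapse of the flat wrap list;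
-- blank_count is positive iff the last emitted element is ""
lemma pv_main (m : Int) :
    ∀ (lines : List (List Char)) (bc : Int) (acc : List (List Char)),
      (∀ l ∈ lines, PySem.Chars.rstrip l ≠ [] → 1 ≤ m) →
      0 ≤ bc → ((1 ≤ bc) ↔ acc.getLast? = some []) →
      (lines.foldl (pvStepA m) (bc, acc)).2 = (lines.flatMap (pvPieceOf m)).foldl pvCollapse acc := by
  intro lines
  induction lines with
  | nil => intro bc acc _ _ _; simp
  | cons raw rest ih =>
    intro bc acc hm hbc hiff
    simp only [List.foldl_cons, List.flatMap_cons, List.foldl_append]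
    by_cases hb : PySem.Chars.rstrip raw = []
    · have hstep : pvStepA m (bc, acc) raw = (bc + 1, if bc + 1 ≤ 1 then acc ++ [[]] else acc) := by
        simp only [pvStepA]
        rw [if_pos ((pv_blank_iff raw).2 hb)]
      have hpiece : pvPieceOf m raw = [[]] := by simp [pvPieceOf, hb]
      rw [hstep, hpiece]
      simp only [List.foldl_cons, List.foldl_nil]
      by_cases h1 : (1:Int) ≤ bc
      · have hlast : acc.getLast? = some [] := hiff.1 h1
        rw [if_neg (by omega), show pvCollapse acc [] = acc from by
          simp [pvCollapse, PySem.List.pyGet?_neg_one, hlast]]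
        exact ih (bc + 1) acc (fun l hl h => hm l (by simp [hl]) h) (by omega)
          ⟨fun _ => hlast, fun _ => by omega⟩
      · have hlast : ¬ acc.getLast? = some [] := fun hc => h1 (hiff.2 hc)
        rw [if_pos (by omega), show pvCollapse acc [] = acc ++ [[]] from by
          simp [pvCollapse, PySem.List.pyGet?_neg_one, hlast]]
        exact ih (bc + 1) _ (fun l hl h => hm l (by simp [hl]) h) (by omega)
          ⟨fun _ => List.getLast?_concat, fun _ => by omega⟩
    · have h1m : 1 ≤ m := hm raw (by simp) hb
      have hstep : pvStepA m (bc, acc) raw = (0, acc ++ pvPieces m (PySem.Chars.rstrip raw)) := by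
        simp only [pvStepA]
        rw [if_neg (fun hc => hb ((pv_blank_iff raw).1 hc)),
            pv_chop_eq m h1m _ _ _ hb le_rfl]
      have hpiece : pvPieceOf m raw = pvPieces m (PySem.Chars.rstrip raw) := by
        simp [pvPieceOf, hb]
      rw [hstep, hpiece, pv_collapse_ne_nil _ acc (pv_pieces_ne_nil m _ h1m hb)]
      apply ih 0 _ (fun l hl h => hm l (by simp [hl]) h) le_rfl
      constructor
      · intro h; omega
      · intro hc
        exfalso
        have hne := pv_pieces_nonempty m _ h1m hb
        rw [List.getLast?_append] at hc
        cases hl : (pvPieces m (PySem.Chars.rstrip raw)).getLast? with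
        | none => exact hne (List.getLast?_eq_none_iff.1 hl)
        | some p =>
          rw [hl] at hc
          simp only [Option.some_or, Option.some.injEq] at hc
          exact pv_pieces_ne_nil m _ h1m hb p (List.mem_of_getLast? hl) hc

lemma pv_both (m : Int) (lines : List (List Char))
    (hm : ∀ l ∈ lines, PySem.Chars.rstrip l ≠ [] → 1 ≤ m) :
    (lines.foldl (pvStepA m) (0, [])).2 = (lines.foldl (pvWrap1 m) []).foldl pvCollapse [] := by
  have hf : pvWrap1 m = fun acc raw => acc ++ pvPieceOf m raw := by
    funext acc raw
    exact pv_wrap1_eq m acc raw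
  rw [hf, PySem.List.foldl_append_eq_flatMap, List.nil_append,
      pv_main m lines 0 [] hm le_rfl (by simp)]

-- ===== VERDICT (by name: the statement is the Claim_ definition above) =====
theorem format_text_for_readability_spec : Claim_equal_format_text_for_readability := by
  intro text m _ hpre
  unfold Spec_format_text_for_readability format_text_for_readability format_text_for_readability_alt
  have hm : ∀ l ∈ PySem.Chars.splitlines text.toList, PySem.Chars.rstrip l ≠ [] → 1 ≤ m := by
    rcases hpre with h | h
    · intro _ _ _; exact h
    · intro l hl hne; exact absurd (h l hl) hne
  rw [pv_both m _ hm]
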